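-- pv_equiv track=rewrite | github.com/Eko-Refugium/DNAbyte | dnabyte/auxiliary.py | sort_lists_by_first_n_entries
-- ===== SOURCE A (Python) =====
-- def sort_lists_by_first_n_entries(lists, n, theory):
--     # Sort the entire list of lists based on the first n entries
--     for lst in lists:
--         for k in range(n):
--             if isinstance(lst[k], str):
--                 lists.remove(lst)
--     lists.sort(key=lambda x: x[:n])
--
--     grouped_lists = {}
--
--     for lst in lists:
--         key = tuple(lst[:n])
--         if key not in grouped_lists:
--             grouped_lists[key] = []
--         grouped_lists[key].append(lst)
--
--     lister = list(grouped_lists.values())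
--
--     if theory == 'yes':
--         return lister
--     else:
--         listend = []
--         for i in range(len(lister)):
--             if len(lister[i])>0:
--                 listend.append(lister[i])
--
--         return listend
-- ===== SOURCE B (Python) =====
-- def sort_lists_by_first_n_entries(lists, n, theory):
--     # One linear pass grouping by key, then sort only the distinct keys.
--     # (Groups are never empty, so the `theory` filter in the original is a no-op.)
--     groups = {}
--     for lst in lists:
--         groups.setdefault(tuple(lst[:n]), []).append(lst)
--     return [groups[k] for k in sorted(groups)]
-- ===== Notes on version B (the rewrite author's own statement) =====
-- stated objective: alternative
-- what changed: Instead of removing-then-sorting the whole list and grouping the sorted list with a membership-tested dict, B groups the original list in one linear pass with dict.setdefault and then sorts only the distinct keys; the theory/empty-group filter disappears because groups are never empty.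
import Mathlib
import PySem

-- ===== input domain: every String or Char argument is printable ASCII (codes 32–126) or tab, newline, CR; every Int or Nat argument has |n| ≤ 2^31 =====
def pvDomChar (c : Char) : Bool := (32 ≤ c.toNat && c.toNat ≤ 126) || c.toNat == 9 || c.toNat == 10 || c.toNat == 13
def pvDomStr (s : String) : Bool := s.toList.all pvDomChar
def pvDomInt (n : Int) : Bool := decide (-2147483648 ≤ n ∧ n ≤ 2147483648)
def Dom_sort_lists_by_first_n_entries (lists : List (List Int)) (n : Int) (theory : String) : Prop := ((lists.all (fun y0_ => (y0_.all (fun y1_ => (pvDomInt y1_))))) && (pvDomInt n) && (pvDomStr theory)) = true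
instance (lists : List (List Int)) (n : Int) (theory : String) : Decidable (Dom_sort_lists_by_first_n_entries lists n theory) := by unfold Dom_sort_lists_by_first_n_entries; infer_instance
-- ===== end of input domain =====

-- B groups in one linear pass (no pre-sort) and sorts only the distinct keys; equivalence is
-- about the RETURN value only (Python A sorts `lists` in place, B does not mutate it).

-- ===== PORT A =====
-- A's first loop scans lst[0..n-1] of every lst testing isinstance(lst[k], str); elements are
-- ints here, so the test is always False and nothing is ever removed: under Pre_ (every list
-- has at least n entries, so no lst[k] raises IndexError) the loop is a no-op and is ported as
-- such.  grouped_lists[key].append(lst) is Dict.modify (the key is always present there).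
def sort_lists_by_first_n_entries (lists : List (List Int)) (n : Int) (theory : String) : List (List (List Int)) :=
  let sortedLists := PySem.List.sorted lists (fun x => PySem.List.slice x none (some n)) false
  let grouped := sortedLists.foldl
    (fun (d : PySem.Dict (List Int) (List (List Int))) lst =>
      let key := PySem.List.slice lst none (some n)
      let d' := if d.contains key then d else d.insert key []
      d'.modify key [] (fun v => v ++ [lst]))
    PySem.Dict.empty
  let lister := grouped.values
  if theory == "yes" then lister
  else
    (PySem.List.pyRange 0 (PySem.List.len lister)).foldl
      (fun listend i =>
        if 0 < (PySem.List.pyGetD lister i []).length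
        then listend ++ [PySem.List.pyGetD lister i []] else listend) []

-- ===== PORT B =====
-- groups.setdefault(tuple(lst[:n]), []).append(lst) is Dict.modify with default [];
-- groups[k] for a key k of the dict is Dict.getD k [] (the key is always present).
def sort_lists_by_first_n_entries_alt (lists : List (List Int)) (n : Int) (theory : String) : List (List (List Int)) :=
  let groups := lists.foldl
    (fun (d : PySem.Dict (List Int) (List (List Int))) lst =>
      d.modify (PySem.List.slice lst none (some n)) [] (fun v => v ++ [lst]))
    PySem.Dict.empty
  (PySem.List.sorted groups.keys (fun k => k) false).map (fun k => groups.getD k [])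

-- ===== PRECONDITION & SPEC =====
-- Pre_ excludes exactly the inputs on which Python A raises IndexError (some list shorter
-- than n, so lst[k] in the first loop is out of range); A returns on every other input.
def Pre_sort_lists_by_first_n_entries (lists : List (List Int)) (n : Int) (theory : String) : Prop :=
  ∀ lst ∈ lists, n.toNat ≤ lst.length
instance (lists : List (List Int)) (n : Int) (theory : String) : Decidable (Pre_sort_lists_by_first_n_entries lists n theory) := by unfold Pre_sort_lists_by_first_n_entries; infer_instance
def pvWitness_sort_lists_by_first_n_entries : List (List Int) × Int × String :=
  ([[1, 2], [1, 3], [0, 5], [1, 2]], 1, "no")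

def Spec_sort_lists_by_first_n_entries (lists : List (List Int)) (n : Int) (theory : String) (out : List (List (List Int))) : Prop := out = sort_lists_by_first_n_entries_alt lists n theory
instance (lists : List (List Int)) (n : Int) (theory : String) (out : List (List (List Int))) : Decidable (Spec_sort_lists_by_first_n_entries lists n theory out) := by unfold Spec_sort_lists_by_first_n_entries; infer_instance

-- ===== CLAIM (what is proved, stated in full; the proofs are below) =====
def Claim_equal_sort_lists_by_first_n_entries : Prop := ∀ (lists : List (List Int)) (n : Int) (theory : String), Dom_sort_lists_by_first_n_entries lists n theory → Pre_sort_lists_by_first_n_entries lists n theory → Spec_sort_lists_by_first_n_entries lists n theory (sort_lists_by_first_n_entries lists n theory)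
-- ===== LEMMAS AND PROOFS =====

-- the two List-Int order instance paths used by `sorted` coincide
theorem pv_sorted_inst (xs : List (List Int)) (key : List Int → List Int) (rev : Bool) :
    @PySem.List.sorted (List Int) (List Int) List.instLT (fun a b => a.decidableLT b) xs key rev
      = @PySem.List.sorted (List Int) (List Int) List.instLinearOrder.toLT LinearOrder.toDecidableLT xs key rev := by
  congr 1

theorem pv_sorted_perm' (xs : List (List Int)) (key : List Int → List Int) (rev : Bool) :
    (@PySem.List.sorted (List Int) (List Int) List.instLinearOrder.toLT LinearOrder.toDecidableLT xs key rev).Perm xs := by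
  rw [← pv_sorted_inst]
  exact PySem.List.sorted_perm xs key rev

-- A's step (membership test + insert [] + append) equals B's step (modify with default [])
theorem pv_stepA_eq_stepB (n : Int) (d : PySem.Dict (List Int) (List (List Int))) (lst : List Int) :
    (let key := PySem.List.slice lst none (some n)
     let d' := if d.contains key then d else d.insert key []
     d'.modify key [] (fun v => v ++ [lst]))
    = d.modify (PySem.List.slice lst none (some n)) [] (fun v => v ++ [lst]) := by
  set key := PySem.List.slice lst none (some n) with hkey
  by_cases h : d.contains key
  · simp [h]
  · have hany : (d.items.any fun p => p.1 == key) = false := Bool.eq_false_iff.mpr h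
    have hnomatch : ∀ p ∈ d.items, p.1 ≠ key := by
      intro p hp hb
      exact h (List.any_eq_true.mpr ⟨p, hp, by simp [hb]⟩)
    have hfind : d.items.find? (fun p => p.1 == key) = none := by
      rw [List.find?_eq_none]; intro p hp; simpa using hnomatch p hp
    have hmapid : ∀ (w : List (List Int)), List.map (fun p => if p.1 = key then (key, w) else p) d.items = d.items := by
      intro w
      conv_rhs => rw [← List.map_id d.items]
      apply List.map_congr_left
      intro p hp
      simp [hnomatch p hp]
    apply PySem.Dict.ext
    simp only [h, if_false, Bool.false_eq_true, ite_false,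
      PySem.Dict.modify, PySem.Dict.getD, PySem.Dict.get?, PySem.Dict.insert,
      PySem.Dict.contains, hany]
    simp [List.any_append, hany, List.find?_append, hfind, hmapid]

theorem pv_dedup_sublist_aux {α : Type} [BEq α] (xs : List α) (acc pre : List α)
    (h : acc.Sublist pre) : (xs.foldl PySem.Set.add acc).Sublist (pre ++ xs) := by
  induction xs generalizing acc pre with
  | nil => simpa using h
  | cons x xs ih =>
    have h2 : (PySem.Set.add acc x).Sublist (pre ++ [x]) := by
      unfold PySem.Set.add
      split
      · exact h.trans (List.sublist_append_left pre [x])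
      · exact List.Sublist.append h (List.Sublist.refl [x])
    simpa using ih (PySem.Set.add acc x) (pre ++ [x]) h2

theorem pv_dedup_sublist {α : Type} [BEq α] (xs : List α) :
    (PySem.List.dedup xs).Sublist xs := by
  simpa using pv_dedup_sublist_aux xs [] [] (List.Sublist.refl [])

theorem pv_insertBy_pairwise {α κ : Type} [LinearOrder κ] (key : α → κ) (x : α) (ys : List α)
    (h : ys.Pairwise (fun a b => key a ≤ key b)) :
    (PySem.List.insertBy (fun a b => decide (key a < key b)) x ys).Pairwise (fun a b => key a ≤ key b) := by
  induction ys with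
  | nil => simp [PySem.List.insertBy]
  | cons y ys ih =>
    rw [List.pairwise_cons] at h
    unfold PySem.List.insertBy
    split
    · rename_i hlt
      rw [decide_eq_true_iff] at hlt
      refine List.pairwise_cons.mpr ⟨?_, List.pairwise_cons.mpr h⟩
      intro b hb
      rcases hb with _ | hb
      · exact le_of_lt hlt
      · exact le_trans (le_of_lt hlt) (h.1 b (by assumption))
    · rename_i hnlt
      rw [decide_eq_true_iff] at hnlt
      push_neg at hnlt
      refine List.pairwise_cons.mpr ⟨?_, ih h.2⟩
      intro b hb
      have := PySem.List.mem_insertBy (before := fun a b => decide (key a < key b)) (x := x) (ys := ys) (y := b)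
      rcases this.mp hb with rfl | hb'
      · exact hnlt
      · exact h.1 b hb'

theorem pv_filter_insertBy {α κ : Type} [LinearOrder κ] [DecidableEq κ] (key : α → κ) (k : κ) (x : α) (ys : List α)
    (h : ys.Pairwise (fun a b => key a ≤ key b)) :
    (PySem.List.insertBy (fun a b => decide (key a < key b)) x ys).filter (fun z => decide (key z = k))
      = if key x = k then ys.filter (fun z => decide (key z = k)) ++ [x]
        else ys.filter (fun z => decide (key z = k)) := by
  induction ys with
  | nil => unfold PySem.List.insertBy; by_cases h : key x = k <;> simp [List.filter, h]
  | cons y ys ih =>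
    rw [List.pairwise_cons] at h
    unfold PySem.List.insertBy
    split
    · rename_i hlt
      rw [decide_eq_true_iff] at hlt
      by_cases hx : key x = k
      · have hempty : (y :: ys).filter (fun z => decide (key z = k)) = [] := by
          rw [List.filter_eq_nil_iff]
          intro z hz
          have : key x < key z := by
            rcases hz with _ | hz
            · exact hlt
            · exact lt_of_lt_of_le hlt (h.1 z (by assumption))
          simp only [decide_eq_true_iff]
          intro hzk; rw [hx] at this; exact absurd hzk (ne_of_gt this)
        rw [List.filter_cons_of_pos (by simp [hx]), hempty]
        simp [hx, hempty]
      · rw [List.filter_cons_of_neg (by simp [hx])]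
        simp [hx]
    · rename_i hnlt
      rw [List.filter_cons]
      rw [ih h.2]
      by_cases hx : key x = k <;> by_cases hy : (key y = k) <;>
        simp [hx, hy, List.filter_cons]

theorem pv_filter_foldl_insertBy {α κ : Type} [LinearOrder κ] [DecidableEq κ] (key : α → κ) (k : κ)
    (xs : List α) (acc : List α) (h : acc.Pairwise (fun a b => key a ≤ key b)) :
    (xs.foldl (fun acc x => PySem.List.insertBy (fun a b => decide (key a < key b)) x acc) acc).filter
        (fun z => decide (key z = k))
      = acc.filter (fun z => decide (key z = k)) ++ xs.filter (fun z => decide (key z = k)) := by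
  induction xs generalizing acc with
  | nil => simp
  | cons x xs ih =>
    rw [List.foldl_cons, ih _ (pv_insertBy_pairwise key x acc h),
      pv_filter_insertBy key k x acc h, List.filter_cons]
    by_cases hx : key x = k <;> simp [hx]

-- stability of PySem's sort: filtering one key class commutes with sorting
theorem pv_filter_sorted {α κ : Type} [LinearOrder κ] [DecidableEq κ] (xs : List α) (key : α → κ) (k : κ) :
    (PySem.List.sorted xs key false).filter (fun x => decide (key x = k))
      = xs.filter (fun x => decide (key x = k)) := by
  rw [PySem.List.sorted_eq_foldl_insertBy]
  simpa using pv_filter_foldl_insertBy key k xs [] (by simp)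

-- deduped keys of the sorted list = sorted deduped keys of the original list
theorem pv_dedup_sorted {α κ : Type} [LinearOrder κ] [BEq κ] [LawfulBEq κ]
    (xs : List α) (key : α → κ) :
    PySem.List.dedup ((PySem.List.sorted xs key false).map key)
      = PySem.List.sorted (PySem.List.dedup (xs.map key)) (fun k => k) false := by
  have hperm : (PySem.List.dedup ((PySem.List.sorted xs key false).map key)).Perm
      (PySem.List.dedup (xs.map key)) := by
    rw [List.perm_ext_iff_of_nodup (PySem.List.nodup_dedup _) (PySem.List.nodup_dedup _)]
    intro a
    rw [PySem.List.mem_dedup, PySem.List.mem_dedup]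
    exact ((PySem.List.sorted_perm xs key false).map key).mem_iff
  have hpair : (PySem.List.dedup ((PySem.List.sorted xs key false).map key)).Pairwise
      (fun a b => (fun k => k) a < (fun k => k) b) := by
    have hsub := pv_dedup_sublist ((PySem.List.sorted xs key false).map key)
    have hle := (PySem.List.sorted_map_key_pairwise xs key).sublist hsub
    have hne : (PySem.List.dedup ((PySem.List.sorted xs key false).map key)).Pairwise (· ≠ ·) :=
      PySem.List.nodup_dedup _
    exact (hle.and hne).imp (fun h => lt_of_le_of_ne h.1 h.2)
  exact (PySem.List.sorted_eq_of_perm_of_pairwise_lt _ _ _ hperm hpair).symm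

theorem pv_find?_map_pair {κ ν : Type} [BEq κ] [LawfulBEq κ] (K : List κ) (v : κ → ν) (k : κ)
    (hk : k ∈ K) :
    List.find? (fun p => p.1 == k) (K.map (fun j => (j, v j))) = some (k, v k) := by
  induction K with
  | nil => cases hk
  | cons a K ih =>
    by_cases h : a = k
    · subst h; simp
    · rcases List.mem_cons.mp hk with h' | h'
      · exact absurd h'.symm h
      · simp [List.find?, h, ih h']

theorem pv_any_map_pair {κ ν : Type} [BEq κ] [LawfulBEq κ] [DecidableEq κ] (K : List κ) (v : κ → ν) (k : κ) :
    (K.map (fun j => (j, v j))).any (fun p => p.1 == k) = decide (k ∈ K) := by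
  induction K with
  | nil => simp
  | cons a K ih =>
    simp only [List.map_cons, List.any_cons, ih]
    by_cases h : k = a
    · subst h; simp
    · simp [List.mem_cons, h, (Ne.symm h : a ≠ k)]

theorem pv_ofList_append_singleton {α : Type} [BEq α] (l : List α) (a : α) :
    PySem.Set.ofList (l ++ [a]) = PySem.Set.add (PySem.Set.ofList l) a := by
  simp [PySem.Set.ofList, List.foldl_append]

-- items of the group dictionary: keys are the deduped key images in first-occurrence order,
-- values are the filters of ys by key class
theorem pv_group_items {α κ : Type} [BEq κ] [LawfulBEq κ] [DecidableEq κ] (kf : α → κ) (ys : List α) :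
    (ys.foldl (fun (d : PySem.Dict κ (List α)) x => d.modify (kf x) [] (fun v => v ++ [x]))
        PySem.Dict.empty).items
      = (PySem.List.dedup (ys.map kf)).map
          (fun k => (k, ys.filter (fun x => decide (kf x = k)))) := by
  induction ys using List.reverseRecOn with
  | nil => rfl
  | append_singleton ys x ih =>
    rw [List.foldl_append, List.foldl_cons, List.foldl_nil]
    set d := ys.foldl (fun (d : PySem.Dict κ (List α)) x => d.modify (kf x) [] (fun v => v ++ [x]))
        PySem.Dict.empty with hd
    set K := PySem.List.dedup (ys.map kf) with hK
    have hdedup : PySem.List.dedup ((ys ++ [x]).map kf) = PySem.Set.add K (kf x) := by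
      rw [List.map_append]; exact pv_ofList_append_singleton _ _
    have hF' : ∀ k, (ys ++ [x]).filter (fun z => decide (kf z = k))
        = ys.filter (fun z => decide (kf z = k)) ++ (if kf x = k then [x] else []) := by
      intro k
      rw [List.filter_append]
      by_cases h : kf x = k <;> simp [h]
    by_cases hx : kf x ∈ K
    · have hcontains : d.contains (kf x) = true := by
        rw [PySem.Dict.contains, ih, pv_any_map_pair]
        exact decide_eq_true hx
      have hget : d.getD (kf x) [] = ys.filter (fun z => decide (kf z = kf x)) := by
        rw [PySem.Dict.getD, PySem.Dict.get?, ih, pv_find?_map_pair K _ (kf x) hx]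
        simp
      have haddK : PySem.Set.add K (kf x) = K := by
        unfold PySem.Set.add
        have : K.contains (kf x) = true := by
          rw [List.contains_iff_exists_mem_beq]
          exact ⟨kf x, hx, by simp⟩
        simp [this]
        exact hx
      rw [hdedup, haddK, PySem.Dict.modify, hget, PySem.Dict.insert]
      rw [if_pos hcontains, ih, List.map_map]
      apply List.map_congr_left
      intro k hkK
      by_cases hk : k = kf x
      · subst hk
        simp [hF' (kf x)]
      · have hne : ¬ (k == kf x) = true := by simpa using hk
        simp only [Function.comp_apply, hne, Bool.false_eq_true, if_false]
        rw [hF' k, if_neg (fun h => hk h.symm)]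
        simp
    · have hcontains : d.contains (kf x) = false := by
        rw [PySem.Dict.contains, ih, pv_any_map_pair]
        exact decide_eq_false hx
      have hget : d.getD (kf x) [] = [] := by
        rw [PySem.Dict.getD, PySem.Dict.get?, ih, List.find?_eq_none.mpr]
        · rfl
        · intro p hp hb
          rcases List.mem_map.mp hp with ⟨k, hkK, rfl⟩
          have hk : k = kf x := by simpa using hb
          exact hx (hk ▸ hkK)
      have haddK : PySem.Set.add K (kf x) = K ++ [kf x] := by
        unfold PySem.Set.add
        have : K.contains (kf x) = false := by
          rw [Bool.eq_false_iff]
          intro hc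
          rcases List.contains_iff_exists_mem_beq.mp hc with ⟨b, hbK, hbeq⟩
          have : kf x = b := by simpa using hbeq
          exact hx (this ▸ hbK)
        simp [this]
        exact hx
      have hFx : ys.filter (fun z => decide (kf z = kf x)) = [] := by
        rw [List.filter_eq_nil_iff]
        intro z hz
        simp only [decide_eq_true_iff]
        intro he
        exact hx ((PySem.List.mem_dedup _ _).mpr (List.mem_map.mpr ⟨z, hz, he⟩))
      rw [hdedup, haddK, PySem.Dict.modify, hget, PySem.Dict.insert]
      rw [if_neg (by simp [hcontains])]
      show d.items ++ [(kf x, [] ++ [x])]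
          = List.map (fun k => (k, List.filter (fun x => decide (kf x = k)) (ys ++ [x]))) (K ++ [kf x])
      rw [ih, List.map_append]
      congr 1
      · apply List.map_congr_left
        intro k hkK
        have hne : kf x ≠ k := fun he => hx (he ▸ hkK)
        rw [hF' k, if_neg hne]
        simp
      · simp [hF' (kf x), hFx]

-- the non-'yes' branch of A keeps every group: every group is nonempty
theorem pv_foldl_filter_keep {β : Type} (xs : List (List β)) (acc : List (List β))
    (h : ∀ v ∈ xs, 0 < v.length) :
    xs.foldl (fun acc v => if 0 < v.length then acc ++ [v] else acc) acc = acc ++ xs := by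
  induction xs generalizing acc with
  | nil => simp
  | cons v xs ih =>
    rw [List.foldl_cons, if_pos (h v (by simp)), ih _ (fun w hw => h w (by simp [hw]))]
    simp

theorem sort_lists_by_first_n_entries_spec_aux (lists : List (List Int)) (n : Int) (theory : String) :
    sort_lists_by_first_n_entries lists n theory = sort_lists_by_first_n_entries_alt lists n theory := by
  unfold sort_lists_by_first_n_entries sort_lists_by_first_n_entries_alt
  have hstep : (fun (d : PySem.Dict (List Int) (List (List Int))) lst =>
      let key := PySem.List.slice lst none (some n)
      let d' := if d.contains key then d else d.insert key []
      d'.modify key [] (fun v => v ++ [lst]))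
    = (fun (d : PySem.Dict (List Int) (List (List Int))) lst =>
      d.modify (PySem.List.slice lst none (some n)) [] (fun v => v ++ [lst])) :=
    funext fun d => funext fun lst => pv_stepA_eq_stepB n d lst
  dsimp only
  rw [hstep, pv_sorted_inst]
  set kf : List Int → List Int := fun x => PySem.List.slice x none (some n) with hkf
  set s' := @PySem.List.sorted (List Int) (List Int) List.instLinearOrder.toLT LinearOrder.toDecidableLT lists kf false with hs'
  set GA := s'.foldl (fun (d : PySem.Dict (List Int) (List (List Int))) lst =>
      d.modify (kf lst) [] (fun v => v ++ [lst])) PySem.Dict.empty with hGA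
  set GB := lists.foldl (fun (d : PySem.Dict (List Int) (List (List Int))) lst =>
      d.modify (kf lst) [] (fun v => v ++ [lst])) PySem.Dict.empty with hGB
  have hitemsA := pv_group_items kf s'
  have hitemsB := pv_group_items kf lists
  have hkmem : ∀ k, k ∈ PySem.List.dedup (s'.map kf) → k ∈ PySem.List.dedup (lists.map kf) := by
    intro k hk
    rw [PySem.List.mem_dedup] at hk ⊢
    exact (((pv_sorted_perm' lists kf false).map kf).mem_iff).mp hk
  have hval : GA.values
      = List.map (fun k => GB.getD k []) (PySem.List.sorted GB.keys (fun k => k) false) := by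
    have hkeys : GB.keys = PySem.List.dedup (lists.map kf) := by
      rw [PySem.Dict.keys, hGB, hitemsB, List.map_map]
      exact List.map_id _
    rw [hkeys, pv_sorted_inst, ← pv_dedup_sorted lists kf]
    rw [PySem.Dict.values, hGA, hitemsA, List.map_map]
    apply List.map_congr_left
    intro k hk
    have hgetD : GB.getD k [] = lists.filter (fun x => decide (kf x = k)) := by
      rw [PySem.Dict.getD, PySem.Dict.get?, hGB, hitemsB,
        pv_find?_map_pair _ _ k (hkmem k hk)]
      simp
    rw [hgetD]
    simpa using pv_filter_sorted lists kf k
  have hne : ∀ v ∈ GA.values, 0 < v.length := by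
    intro v hv
    rw [PySem.Dict.values, hGA, hitemsA, List.map_map] at hv
    rcases List.mem_map.mp hv with ⟨k, hk, rfl⟩
    rcases List.mem_map.mp ((PySem.List.mem_dedup _ _).mp hk) with ⟨z, hz, rfl⟩
    have : z ∈ s'.filter (fun x => decide (kf x = kf z)) :=
      List.mem_filter.mpr ⟨hz, by simp⟩
    have hlen := List.length_pos_of_mem this
    simpa using hlen
  by_cases hth : (theory == "yes") = true
  · rw [if_pos hth]
    exact hval
  · rw [if_neg hth]
    have hfold := PySem.List.foldl_pyRange_pyGetD GA.values ([] : List (List Int))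
      (fun acc v => if 0 < v.length then acc ++ [v] else acc) [] (a := 0) (le_refl 0)
    simp only [Int.toNat_zero, List.drop_zero] at hfold
    rw [hfold, pv_foldl_filter_keep GA.values [] hne]
    simpa using hval

-- ===== VERDICT (by name: the statement is the Claim_ definition above) =====
theorem sort_lists_by_first_n_entries_spec : Claim_equal_sort_lists_by_first_n_entries := by
  intro lists n theory _ _
  unfold Spec_sort_lists_by_first_n_entries
  exact sort_lists_by_first_n_entries_spec_aux lists n theory
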